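-- pv_equiv track=rewrite | github.com/mariaandrioli/ciencia-de-dados | T2/Parte1/apks_analysis.py | unique_permissions
-- ===== SOURCE A (Python) =====
-- from itertools import chain
--
-- def unique_permissions(permissions):
-- 	keys = list(permissions.keys())
-- 	values = list(permissions.values())
-- 	uniques_dict = {}
--
-- 	for A in values:
-- 		# Combine all the lists into one
-- 		super_list = list(chain(*values))
-- 		# Remove the items from the list under consideration
-- 		for x in A:
-- 			super_list.remove(x)
-- 		# Get the unique items remaining in the combined list
-- 		super_set = set(super_list)
-- 		# Compute the unique items in this list and print them
-- 		uniques = set(A) - super_set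
-- 		uniques_dict[keys.pop(0)] = sorted(uniques)
--
-- 	return uniques_dict
-- ===== SOURCE B (Python) =====
-- def unique_permissions(permissions):
--     # Inverted index: permission item -> set of app keys whose list contains it.
--     owners = {}
--     for key, items in permissions.items():
--         for x in items:
--             owners.setdefault(x, set()).add(key)
--     # Pre-seed so apps with no unique permission still map to [].
--     result = {key: [] for key in permissions}
--     # One pass over the index: items owned by exactly one app go to that app.
--     for item, ks in owners.items():
--         if len(ks) == 1:
--             for k in ks:
--                 result[k].append(item)
--     return {k: sorted(v) for k, v in result.items()}
-- ===== Notes on version B (the rewrite author's own statement) =====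
-- stated objective: faster
-- what changed: Replaces A's per-app pass that rebuilds the concatenation of all permission lists and removes the app's own items one by one with a single-pass inverted index (permission -> set of owning apps) that is bucketed once into a pre-seeded result dict.
import Mathlib
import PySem

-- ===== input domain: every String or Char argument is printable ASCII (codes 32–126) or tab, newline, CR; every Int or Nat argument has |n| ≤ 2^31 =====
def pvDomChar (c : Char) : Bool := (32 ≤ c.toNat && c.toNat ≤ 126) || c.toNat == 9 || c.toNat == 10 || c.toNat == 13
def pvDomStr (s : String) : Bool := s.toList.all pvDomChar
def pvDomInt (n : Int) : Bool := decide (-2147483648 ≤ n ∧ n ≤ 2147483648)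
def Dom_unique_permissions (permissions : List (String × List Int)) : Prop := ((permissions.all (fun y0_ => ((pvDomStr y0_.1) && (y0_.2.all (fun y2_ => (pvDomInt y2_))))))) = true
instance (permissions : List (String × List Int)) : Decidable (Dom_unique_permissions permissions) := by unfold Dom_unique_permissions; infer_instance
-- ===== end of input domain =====

-- B replaces A's quadratic per-app rescans of the combined list by a single-pass
-- inverted index (permission -> owning apps) bucketed once; objective: faster.


-- ===== PORT A =====
-- 'for x in A: super_list.remove(x)'.  Python's list.remove raises ValueError when x is
-- absent; here every x ∈ A occurs in super_list (which contains A itself), so the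
-- 'none' branch of remove? is unreachable and '.getD sl' is exact.
def pyRemoveEach (sl A : List Int) : List Int :=
  A.foldl (fun sl x => (PySem.List.remove? sl x).getD sl) sl

def unique_permissions (permissions : List (String × List Int)) : List (String × List Int) :=
  let keys := permissions.map Prod.fst
  let values := permissions.map Prod.snd
  let uniques_dict : PySem.Dict String (List Int) := PySem.Dict.empty
  let st := values.foldl
    (fun (st : List String × PySem.Dict String (List Int)) A =>
      let super_list := values.flatten
      let super_list := pyRemoveEach super_list A
      let super_set := PySem.Set.ofList super_list
      let uniques := PySem.Set.diff (PySem.Set.ofList A) super_set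
      -- keys.pop(0): keys has one entry per value, so it is never empty here
      match st.1 with
      | [] => st
      | k :: rest => (rest, st.2.insert k (PySem.List.sorted uniques (fun x => x) false)))
    (keys, uniques_dict)
  st.2.items

-- ===== PORT B =====
def unique_permissions_alt (permissions : List (String × List Int)) : List (String × List Int) :=
  let owners : PySem.Dict Int (PySem.Set String) :=
    permissions.foldl
      (fun d kv => kv.2.foldl (fun d x => d.modify x PySem.Set.empty (fun s => PySem.Set.add s kv.1)) d)
      PySem.Dict.empty
  let result : PySem.Dict String (List Int) :=
    permissions.foldl (fun r kv => r.insert kv.1 ([] : List Int)) PySem.Dict.empty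
  -- result[k].append(item): k is a key of `owners`' sets, hence a key of `result`,
  -- so the KeyError branch is unreachable; modify with default [] is exact there.
  let result := owners.items.foldl
    (fun r (pr : Int × PySem.Set String) =>
      if PySem.Set.len pr.2 = 1 then
        pr.2.foldl (fun r k => r.modify k ([] : List Int) (fun v => v ++ [pr.1])) r
      else r)
    result
  result.items.map (fun kv => (kv.1, PySem.List.sorted kv.2 (fun x => x) false))

-- ===== PRECONDITION & SPEC =====
-- Pre_ excludes association lists with duplicate app keys: a Python dict cannot carry
-- them, so A's overwrite-on-reinsertion behaviour there is an artefact of the encoding.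
def Pre_unique_permissions (permissions : List (String × List Int)) : Prop :=
  (permissions.map Prod.fst).Nodup
instance (permissions : List (String × List Int)) : Decidable (Pre_unique_permissions permissions) := by unfold Pre_unique_permissions; infer_instance

def pvWitness_unique_permissions : (List (String × List Int)) :=
  [("app.one", [1, 2, 2]), ("app.two", [2, 3]), ("app.three", [])]

def Spec_unique_permissions (permissions : List (String × List Int)) (out : List (String × List Int)) : Prop := out = unique_permissions_alt permissions
instance (permissions : List (String × List Int)) (out : List (String × List Int)) : Decidable (Spec_unique_permissions permissions out) := by unfold Spec_unique_permissions; infer_instance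

-- ===== CLAIM (what is proved, stated in full; the proofs are below) =====
def Claim_equal_unique_permissions : Prop := ∀ (permissions : List (String × List Int)), Dom_unique_permissions permissions → Pre_unique_permissions permissions → Spec_unique_permissions permissions (unique_permissions permissions)

-- ===== LEMMAS AND PROOFS =====

-- abbreviations used only by the proofs
def pvFlat (p : List (String × List Int)) : List Int := (p.map Prod.snd).flatten

def pvOwners (p : List (String × List Int)) (x : Int) : List String :=
  (p.filter (fun kv => decide (x ∈ kv.2))).map Prod.fst

def pvA (p : List (String × List Int)) (A : List Int) : List Int :=
  PySem.List.sorted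
    (PySem.Set.diff (PySem.Set.ofList A) (PySem.Set.ofList (pyRemoveEach (pvFlat p) A)))
    (fun x => x) false

-- counting what the remove loop leaves behind
lemma count_pyRemoveEach (A : List Int) : ∀ (sl : List Int) (x : Int),
    (pyRemoveEach sl A).count x = sl.count x - min (A.count x) (sl.count x) := by
  induction A with
  | nil => intro sl x; simp [pyRemoveEach]
  | cons a A ih =>
    intro sl x
    by_cases ha : a ∈ sl
    · have h1 : pyRemoveEach sl (a :: A) = pyRemoveEach (sl.erase a) A := by
        simp [pyRemoveEach, PySem.List.remove?_eq_some_erase sl a ha]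
      rw [h1, ih]
      have hc : 1 ≤ sl.count a := List.count_pos_iff.mpr ha
      rw [List.count_erase, List.count_cons]
      by_cases hax : a = x
      · subst hax
        simp only [beq_self_eq_true, if_true]
        simp only [Nat.min_def]; split_ifs <;> omega
      · rw [if_neg (by simpa using hax)]
        simp only [Nat.min_def]; split_ifs <;> omega
    · have h1 : pyRemoveEach sl (a :: A) = pyRemoveEach sl A := by
        have : PySem.List.remove? sl a = none := (PySem.List.remove?_eq_none_iff sl a).mpr ha
        simp [pyRemoveEach, this]
      rw [h1, ih, List.count_cons]
      by_cases hax : a = x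
      · subst hax
        have hc : sl.count a = 0 := List.count_eq_zero.mpr ha
        simp only [beq_self_eq_true, if_true]
        simp only [Nat.min_def]; split_ifs <;> omega
      · rw [if_neg (by simpa using hax)]
        simp only [Nat.min_def]; split_ifs <;> omega
lemma mem_pyRemoveEach (sl A : List Int) (x : Int) :
    x ∈ pyRemoveEach sl A ↔ A.count x < sl.count x := by
  rw [← List.count_pos_iff, count_pyRemoveEach]
  omega
-- A's fold: the key list and the value list march in step
lemma foldA (f : List Int → List Int) : ∀ (q : List (String × List Int)) (d : PySem.Dict String (List Int)),
    ((q.map Prod.snd).foldl (fun (st : List String × PySem.Dict String (List Int)) A =>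
        match st.1 with
        | [] => st
        | k :: rest => (rest, st.2.insert k (f A))) (q.map Prod.fst, d)).2
      = q.foldl (fun d kv => d.insert kv.1 (f kv.2)) d := by
  intro q
  induction q with
  | nil => intro d; simp
  | cons kv q ih => intro d; simpa using ih (d.insert kv.1 (f kv.2))
-- A's result as a map over the entries
lemma portA_eq (p : List (String × List Int)) (hnd : (p.map Prod.fst).Nodup) :
    unique_permissions p = p.map (fun kv => (kv.1, pvA p kv.2)) := by
  have h1 := foldA (fun A => PySem.List.sorted
      (PySem.Set.diff (PySem.Set.ofList A)
        (PySem.Set.ofList (pyRemoveEach (p.map Prod.snd).flatten A)))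
      (fun x => x) false) p PySem.Dict.empty
  have h2 := PySem.Dict.items_foldl_insert_fresh p Prod.fst (fun kv => pvA p kv.2)
      PySem.Dict.empty (fun a _ => by simp) hnd
  calc unique_permissions p
      = (p.foldl (fun d kv => d.insert kv.1 (pvA p kv.2)) PySem.Dict.empty).items :=
        congrArg PySem.Dict.items h1
    _ = PySem.Dict.empty.items ++ p.map (fun a => (a.1, pvA p a.2)) := h2
    _ = p.map (fun kv => (kv.1, pvA p kv.2)) := by simp [PySem.Dict.empty]

-- B: the inner loop of the inverted-index pass
lemma ownersInner (k : String) : ∀ (l : List Int) (d : PySem.Dict Int (PySem.Set String)) (x : Int),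
    (l.foldl (fun d x => d.modify x PySem.Set.empty (fun s => PySem.Set.add s k)) d).getD x PySem.Set.empty
      = if x ∈ l then PySem.Set.add (d.getD x PySem.Set.empty) k else d.getD x PySem.Set.empty := by
  intro l
  induction l with
  | nil => intro d x; simp
  | cons a l ih =>
    intro d x
    rw [List.foldl_cons, ih, PySem.Dict.getD_modify]
    by_cases hx : x = a
    · subst hx
      by_cases hm : x ∈ l
      · simp [hm]
      · simp [hm]
    · simp [hx, List.mem_cons]
-- B: one owner set of the inverted index
lemma ownersGetD : ∀ (q : List (String × List Int)) (d : PySem.Dict Int (PySem.Set String)) (x : Int),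
    (q.foldl (fun d kv => kv.2.foldl (fun d x => d.modify x PySem.Set.empty (fun s => PySem.Set.add s kv.1)) d) d).getD x PySem.Set.empty
      = PySem.Set.update (d.getD x PySem.Set.empty) ((q.filter (fun kv => decide (x ∈ kv.2))).map Prod.fst) := by
  intro q
  induction q with
  | nil => intro d x; simp [PySem.Set.update]
  | cons kv q ih =>
    intro d x
    rw [List.foldl_cons, ih, ownersInner]
    by_cases hm : x ∈ kv.2
    · simp [hm, PySem.Set.update_cons]
    · simp [hm]
-- B: the keys of the inverted index
lemma ownersKeys : ∀ (q : List (String × List Int)) (d : PySem.Dict Int (PySem.Set String)),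
    (q.foldl (fun d kv => kv.2.foldl (fun d x => d.modify x PySem.Set.empty (fun s => PySem.Set.add s kv.1)) d) d).keys
      = PySem.Set.update d.keys (q.map Prod.snd).flatten := by
  intro q
  induction q with
  | nil => intro d; simp [PySem.Set.update]
  | cons kv q ih =>
    intro d
    rw [List.foldl_cons, ih,
      show (kv.2.foldl (fun d x => d.modify x PySem.Set.empty (fun s => PySem.Set.add s kv.1)) d).keys
          = PySem.Set.update d.keys kv.2 from
        PySem.Dict.keys_foldl_modify kv.2 PySem.Set.empty (fun _ _ => fun s => PySem.Set.add s kv.1) d]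
    simp [PySem.Set.update_append]
-- B: the pre-seeded result dict maps everything to []
lemma r0GetD : ∀ (q : List (String × List Int)) (d : PySem.Dict String (List Int)) (k : String),
    d.getD k [] = [] →
    (q.foldl (fun r kv => r.insert kv.1 ([] : List Int)) d).getD k [] = [] := by
  intro q
  induction q with
  | nil => intro d k h; simpa using h
  | cons kv q ih =>
    intro d k h
    rw [List.foldl_cons]
    exact ih _ k (by rw [PySem.Dict.getD_insert]; split_ifs <;> simp [h])
-- B: the bucketing pass keeps the key set
lemma bucketKeys : ∀ (xs : List (Int × PySem.Set String)) (d : PySem.Dict String (List Int)),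
    (∀ pr ∈ xs, ∀ k ∈ pr.2, k ∈ d.keys) →
    (xs.foldl (fun r (pr : Int × PySem.Set String) =>
        if PySem.Set.len pr.2 = 1 then
          pr.2.foldl (fun r k => r.modify k ([] : List Int) (fun v => v ++ [pr.1])) r
        else r) d).keys = d.keys := by
  intro xs
  induction xs with
  | nil => intro d _; rfl
  | cons pr xs ih =>
    intro d h
    rw [List.foldl_cons]
    have hstep : ∀ (e : PySem.Dict String (List Int)), (∀ k ∈ pr.2, k ∈ e.keys) →
        ((if PySem.Set.len pr.2 = 1 then
            pr.2.foldl (fun r k => r.modify k ([] : List Int) (fun v => v ++ [pr.1])) e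
          else e)).keys = e.keys := by
      intro e he
      split_ifs with hl
      · rw [show (pr.2.foldl (fun r k => r.modify k ([] : List Int) (fun v => v ++ [pr.1])) e).keys
              = PySem.Set.update e.keys pr.2 from
            PySem.Dict.keys_foldl_modify pr.2 [] (fun _ _ => fun v => v ++ [pr.1]) e]
        rw [PySem.Set.update_eq_append_filter]
        have : (PySem.Set.ofList pr.2).filter (fun y => !PySem.Set.contains e.keys y) = [] := by
          rw [List.filter_eq_nil_iff]
          intro a ha
          simp only [Bool.not_eq_true', PySem.Set.contains_eq_listContains]
          simp
          exact he a ((PySem.Set.mem_ofList _ _).mp ha)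
        rw [this, List.append_nil]
      · rfl
    rw [ih _ (fun q hq k hk => by
        rw [hstep d (h pr (List.mem_cons_self) )]
        exact h q (List.mem_cons_of_mem _ hq) k hk),
      hstep d (h pr List.mem_cons_self)]
-- B: what the bucketing pass appends to one app's bucket
lemma bucketGetD : ∀ (xs : List (Int × PySem.Set String)) (d : PySem.Dict String (List Int)) (k : String),
    (xs.foldl (fun r (pr : Int × PySem.Set String) =>
        if PySem.Set.len pr.2 = 1 then
          pr.2.foldl (fun r k => r.modify k ([] : List Int) (fun v => v ++ [pr.1])) r
        else r) d).getD k []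
      = d.getD k [] ++ (xs.filter (fun pr => pr.2 == [k])).map Prod.fst := by
  intro xs
  induction xs with
  | nil => intro d k; simp
  | cons pr xs ih =>
    intro d k
    rw [List.foldl_cons, ih, List.filter_cons]
    rcases hpr : pr.2 with _ | ⟨k0, t⟩
    · have h1 : PySem.Set.len (α := String) [] ≠ 1 := by simp [PySem.Set.len]
      rw [if_neg h1]
      simp
    · rcases t with _ | ⟨k1, t⟩
      · -- singleton owner set
        have h1 : PySem.Set.len [k0] = 1 := by simp [PySem.Set.len]
        rw [if_pos h1, List.foldl_cons, List.foldl_nil, PySem.Dict.getD_modify]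
        by_cases hk : k = k0
        · subst hk
          have h2 : (([k] : List String) == [k]) = true := by simp
          rw [if_pos rfl, h2]
          simp
        · have h2 : (([k0] : List String) == [k]) = false := by simp; exact fun h => hk h.symm
          rw [if_neg hk, h2]
          simp
      · have h1 : PySem.Set.len (k0 :: k1 :: t) ≠ 1 := by
          simp [PySem.Set.len]; omega
        rw [if_neg h1]
        have h2 : ((k0 :: k1 :: t : List String) == [k]) = false := by simp
        rw [h2]
        simp
-- B's result as a map over the entries
lemma portB_eq (p : List (String × List Int)) (hnd : (p.map Prod.fst).Nodup) :
    unique_permissions_alt p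
      = p.map (fun kv => (kv.1,
          PySem.List.sorted
            ((PySem.Set.ofList (pvFlat p)).filter
              (fun x => PySem.Set.ofList (pvOwners p x) == [kv.1]))
            (fun x => x) false)) := by
  have hOK : (p.foldl (fun d kv => kv.2.foldl (fun d x => d.modify x PySem.Set.empty (fun s => PySem.Set.add s kv.1)) d) PySem.Dict.empty).keys
      = PySem.Set.ofList (pvFlat p) := by
    rw [ownersKeys p PySem.Dict.empty, PySem.Dict.keys_empty, PySem.Set.update_nil_left]; rfl
  have hOG : ∀ x, (p.foldl (fun d kv => kv.2.foldl (fun d x => d.modify x PySem.Set.empty (fun s => PySem.Set.add s kv.1)) d) PySem.Dict.empty).getD x PySem.Set.empty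
      = PySem.Set.ofList (pvOwners p x) := by
    intro x
    rw [ownersGetD p PySem.Dict.empty x, PySem.Dict.getD_empty, PySem.Set.update_empty]
    rfl
  have hItems : (p.foldl (fun d kv => kv.2.foldl (fun d x => d.modify x PySem.Set.empty (fun s => PySem.Set.add s kv.1)) d) PySem.Dict.empty).items
      = (PySem.Set.ofList (pvFlat p)).map (fun x => (x, PySem.Set.ofList (pvOwners p x))) := by
    rw [PySem.Dict.items_eq_map_keys _ (by rw [hOK]; exact PySem.Set.nodup_ofList _) PySem.Set.empty, hOK]
    exact List.map_congr_left (fun x _ => by rw [hOG])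
  have hR0keys : (p.foldl (fun r kv => r.insert kv.1 ([] : List Int)) PySem.Dict.empty).keys
      = p.map Prod.fst := by
    have h := PySem.Dict.keys_foldl_insert_key p Prod.fst (fun _ _ => ([] : List Int)) PySem.Dict.empty
    rw [show (p.foldl (fun r kv => r.insert kv.1 ([] : List Int)) PySem.Dict.empty).keys
        = PySem.Set.update PySem.Dict.empty.keys (p.map Prod.fst) from h,
      PySem.Dict.keys_empty, PySem.Set.update_nil_left]
    exact PySem.Set.ofList_eq_self_of_nodup _ hnd
  have hsub : ∀ pr ∈ (p.foldl (fun d kv => kv.2.foldl (fun d x => d.modify x PySem.Set.empty (fun s => PySem.Set.add s kv.1)) d) PySem.Dict.empty).items,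
      ∀ k ∈ pr.2, k ∈ (p.foldl (fun r kv => r.insert kv.1 ([] : List Int)) PySem.Dict.empty).keys := by
    intro pr hpr k hk
    rw [hR0keys]
    rw [hItems] at hpr
    obtain ⟨x, _, rfl⟩ := List.mem_map.mp hpr
    have hx := (PySem.Set.mem_ofList _ _).mp hk
    obtain ⟨kv, hkv, rfl⟩ := List.mem_map.mp hx
    exact List.mem_map.mpr ⟨kv, (List.mem_filter.mp hkv).1, rfl⟩
  have hFkeys := (bucketKeys _ _ hsub).trans hR0keys
  have hFgetD := bucketGetD ((p.foldl (fun d kv => kv.2.foldl (fun d x => d.modify x PySem.Set.empty (fun s => PySem.Set.add s kv.1)) d) PySem.Dict.empty).items)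
      (p.foldl (fun r kv => r.insert kv.1 ([] : List Int)) PySem.Dict.empty)
  have hFitems := PySem.Dict.items_eq_map_keys
      (((p.foldl (fun d kv => kv.2.foldl (fun d x => d.modify x PySem.Set.empty (fun s => PySem.Set.add s kv.1)) d) PySem.Dict.empty).items).foldl
        (fun r (pr : Int × PySem.Set String) =>
          if PySem.Set.len pr.2 = 1 then
            pr.2.foldl (fun r k => r.modify k ([] : List Int) (fun v => v ++ [pr.1])) r
          else r)
        (p.foldl (fun r kv => r.insert kv.1 ([] : List Int)) PySem.Dict.empty))
      (by rw [hFkeys]; exact hnd) ([] : List Int)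
  rw [show unique_permissions_alt p
      = (((p.foldl (fun d kv => kv.2.foldl (fun d x => d.modify x PySem.Set.empty (fun s => PySem.Set.add s kv.1)) d) PySem.Dict.empty).items).foldl
          (fun r (pr : Int × PySem.Set String) =>
            if PySem.Set.len pr.2 = 1 then
              pr.2.foldl (fun r k => r.modify k ([] : List Int) (fun v => v ++ [pr.1])) r
            else r)
          (p.foldl (fun r kv => r.insert kv.1 ([] : List Int)) PySem.Dict.empty)).items.map
          (fun kv => (kv.1, PySem.List.sorted kv.2 (fun x => x) false)) from rfl,
    hFitems, hFkeys, List.map_map, List.map_map]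
  refine List.map_congr_left (fun kv hkv => ?_)
  simp only [Function.comp]
  congr 1
  rw [hFgetD, r0GetD p PySem.Dict.empty kv.1 (by rw [PySem.Dict.getD_empty]), List.nil_append,
    hItems, List.filter_map, List.map_map]
  refine congrArg (fun l => PySem.List.sorted l (fun x => x) false) ?_
  simp [Function.comp_def]

-- the crux: "x is in A and survives nowhere else" = "x's owner set is exactly {k}"
lemma core (p : List (String × List Int)) (hnd : (p.map Prod.fst).Nodup)
    (kv : String × List Int) (hkv : kv ∈ p) (x : Int) :
    (x ∈ kv.2 ∧ x ∉ pyRemoveEach (pvFlat p) kv.2)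
      ↔ (x ∈ pvFlat p ∧ PySem.Set.ofList (pvOwners p x) = [kv.1]) := by
  obtain ⟨p₁, p₂, rfl⟩ := List.append_of_mem hkv
  have hcnt : (pvFlat (p₁ ++ kv :: p₂)).count x
      = (pvFlat p₁).count x + kv.2.count x + (pvFlat p₂).count x := by
    simp [pvFlat, List.count_append]
    omega
  have hnd' := hnd
  simp only [List.map_append, List.map_cons, List.nodup_append, List.nodup_cons] at hnd'
  have hk1 : kv.1 ∉ p₁.map Prod.fst := fun h => hnd'.2.2 kv.1 h kv.1 (by simp) rfl
  have hk2 : kv.1 ∉ p₂.map Prod.fst := hnd'.2.1.1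
  have hfilter : (p₁ ++ kv :: p₂).filter (fun kv' => decide (x ∈ kv'.2))
      = p₁.filter (fun kv' => decide (x ∈ kv'.2))
        ++ (if x ∈ kv.2 then [kv] else [])
        ++ p₂.filter (fun kv' => decide (x ∈ kv'.2)) := by
    rw [List.filter_append, List.filter_cons]
    by_cases h : x ∈ kv.2 <;> simp [h]
  constructor
  · rintro ⟨hxA, hnot⟩
    rw [mem_pyRemoveEach] at hnot
    rw [not_lt] at hnot
    rw [hcnt] at hnot
    have hc1 : (pvFlat p₁).count x = 0 := by omega
    have hc2 : (pvFlat p₂).count x = 0 := by omega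
    have hf1 : p₁.filter (fun kv' => decide (x ∈ kv'.2)) = [] := by
      rw [List.filter_eq_nil_iff]
      intro a ha hmem
      have hx1 : x ∈ pvFlat p₁ :=
        List.mem_flatten.mpr ⟨a.2, List.mem_map.mpr ⟨a, ha, rfl⟩, by simpa using hmem⟩
      exact absurd hx1 (List.count_eq_zero.mp hc1)
    have hf2 : p₂.filter (fun kv' => decide (x ∈ kv'.2)) = [] := by
      rw [List.filter_eq_nil_iff]
      intro a ha hmem
      have hx2 : x ∈ pvFlat p₂ :=
        List.mem_flatten.mpr ⟨a.2, List.mem_map.mpr ⟨a, ha, rfl⟩, by simpa using hmem⟩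
      exact absurd hx2 (List.count_eq_zero.mp hc2)
    refine ⟨?_, ?_⟩
    · simp [pvFlat]
      exact Or.inr (Or.inl hxA)
    · unfold pvOwners
      rw [hfilter, hf1, hf2, if_pos hxA]
      simp
      exact PySem.Set.ofList_eq_self_of_nodup _ (List.nodup_singleton _)
  · rintro ⟨hxflat, hO⟩
    have hxA : x ∈ kv.2 := by
      by_contra hxn
      unfold pvOwners at hO
      rw [hfilter, if_neg hxn] at hO
      have hkmem : kv.1 ∈ PySem.Set.ofList ((p₁.filter (fun kv' : String × List Int => decide (x ∈ kv'.2)) ++ [] ++ p₂.filter (fun kv' : String × List Int => decide (x ∈ kv'.2))).map Prod.fst) := by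
        rw [hO]; simp
      rw [PySem.Set.mem_ofList] at hkmem
      simp only [List.append_nil, List.map_append, List.mem_append] at hkmem
      rcases hkmem with h | h
      · obtain ⟨a, ha, haa⟩ := List.mem_map.mp h
        exact hk1 (List.mem_map.mpr ⟨a, (List.mem_filter.mp ha).1, haa⟩)
      · obtain ⟨a, ha, haa⟩ := List.mem_map.mp h
        exact hk2 (List.mem_map.mpr ⟨a, (List.mem_filter.mp ha).1, haa⟩)
    refine ⟨hxA, ?_⟩
    -- derive that no other entry contains x
    unfold pvOwners at hO
    rw [hfilter, if_pos hxA] at hO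
    have hsl : ((p₁.filter (fun kv' => decide (x ∈ kv'.2)) ++ [kv] ++ p₂.filter (fun kv' => decide (x ∈ kv'.2))).map Prod.fst).Nodup := by
      refine List.Nodup.sublist ?_ hnd
      refine List.Sublist.map Prod.fst ?_
      have h1 : (p₁.filter (fun kv' => decide (x ∈ kv'.2))).Sublist p₁ := List.filter_sublist
      have h2 : (p₂.filter (fun kv' => decide (x ∈ kv'.2))).Sublist p₂ := List.filter_sublist
      have h3 := List.Sublist.append h1 (List.Sublist.cons₂ kv h2)
      simpa using h3
    rw [PySem.Set.ofList_eq_self_of_nodup _ hsl] at hO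
    have hlen := congrArg List.length hO
    simp at hlen
    have hf1 : p₁.filter (fun kv' => decide (x ∈ kv'.2)) = [] :=
      List.length_eq_zero_iff.mp (by omega)
    have hf2 : p₂.filter (fun kv' => decide (x ∈ kv'.2)) = [] :=
      List.length_eq_zero_iff.mp (by omega)
    rw [mem_pyRemoveEach, hcnt]
    have hc1 : (pvFlat p₁).count x = 0 := by
      rw [List.count_eq_zero]
      intro hmem
      simp [pvFlat] at hmem
      obtain ⟨l, ⟨a, ha⟩, hxl⟩ := hmem
      have : (a, l) ∈ p₁.filter (fun kv' => decide (x ∈ kv'.2)) := List.mem_filter.mpr ⟨ha, by simpa using hxl⟩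
      rw [hf1] at this; cases this
    have hc2 : (pvFlat p₂).count x = 0 := by
      rw [List.count_eq_zero]
      intro hmem
      simp [pvFlat] at hmem
      obtain ⟨l, ⟨a, ha⟩, hxl⟩ := hmem
      have : (a, l) ∈ p₂.filter (fun kv' => decide (x ∈ kv'.2)) := List.mem_filter.mpr ⟨ha, by simpa using hxl⟩
      rw [hf2] at this; cases this
    omega

-- per-entry agreement of the two maps
lemma entry_eq (p : List (String × List Int)) (hnd : (p.map Prod.fst).Nodup)
    (kv : String × List Int) (hkv : kv ∈ p) :
    pvA p kv.2
      = PySem.List.sorted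
          ((PySem.Set.ofList (pvFlat p)).filter
            (fun x => PySem.Set.ofList (pvOwners p x) == [kv.1]))
          (fun x => x) false := by
  apply PySem.List.sorted_eq_sorted_of_perm _ _ (fun x => x) (fun a b h => h)
  rw [List.perm_ext_iff_of_nodup
    (PySem.Set.nodup_diff _ _ (PySem.Set.nodup_ofList _))
    (List.Nodup.filter _ (PySem.Set.nodup_ofList _))]
  intro a
  rw [PySem.Set.mem_diff, PySem.Set.mem_ofList, PySem.Set.mem_ofList, List.mem_filter,
    PySem.Set.mem_ofList]
  have h := core p hnd kv hkv a
  constructor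
  · intro ⟨h1, h2⟩
    obtain ⟨h3, h4⟩ := h.mp ⟨h1, h2⟩
    exact ⟨h3, by simpa using h4⟩
  · intro ⟨h1, h2⟩
    exact h.mpr ⟨h1, by simpa using h2⟩

-- ===== VERDICT (by name: the statement is the Claim_ definition above) =====
theorem unique_permissions_spec : Claim_equal_unique_permissions := by
  intro p _ hnd
  unfold Spec_unique_permissions
  rw [portA_eq p hnd, portB_eq p hnd]
  exact List.map_congr_left (fun kv hkv => by rw [entry_eq p hnd kv hkv])
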